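-- pv_equiv track=rewrite | github.com/jorgecasas23/EstructurasdeDatos-Tarea1 | Tarea1.py | sumarValoresMatriz
-- ===== SOURCE A (Python) =====
-- def sumarValoresMatriz(matriz, par):
--     i = 0
--     j = 0
--     k = 0
--     l = 0
--     sumaParejas = 0
--     for i, j in par:
--         if i in matriz:
--             for k, l in matriz[i]:
--                 if j == k:
--                     sumaParejas += l
--     return sumaParejas
-- ===== SOURCE B (Python) =====
-- def sumarValoresMatriz(matriz, par):
--     cnt = {}
--     for p in par:
--         cnt[p] = cnt.get(p, 0) + 1
--     total = 0
--     for i, fila in matriz.items():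
--         for k, l in fila:
--             total += l * cnt.get((i, k), 0)
--     return total
-- ===== Notes on version B (the rewrite author's own statement) =====
-- stated objective: alternative
-- what changed: Instead of scanning a matrix row once per requested pair, B builds a multiplicity table of the pairs in one pass and then scans the whole matrix once, adding each value times the multiplicity of its (row, key) pair.
import Mathlib
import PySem

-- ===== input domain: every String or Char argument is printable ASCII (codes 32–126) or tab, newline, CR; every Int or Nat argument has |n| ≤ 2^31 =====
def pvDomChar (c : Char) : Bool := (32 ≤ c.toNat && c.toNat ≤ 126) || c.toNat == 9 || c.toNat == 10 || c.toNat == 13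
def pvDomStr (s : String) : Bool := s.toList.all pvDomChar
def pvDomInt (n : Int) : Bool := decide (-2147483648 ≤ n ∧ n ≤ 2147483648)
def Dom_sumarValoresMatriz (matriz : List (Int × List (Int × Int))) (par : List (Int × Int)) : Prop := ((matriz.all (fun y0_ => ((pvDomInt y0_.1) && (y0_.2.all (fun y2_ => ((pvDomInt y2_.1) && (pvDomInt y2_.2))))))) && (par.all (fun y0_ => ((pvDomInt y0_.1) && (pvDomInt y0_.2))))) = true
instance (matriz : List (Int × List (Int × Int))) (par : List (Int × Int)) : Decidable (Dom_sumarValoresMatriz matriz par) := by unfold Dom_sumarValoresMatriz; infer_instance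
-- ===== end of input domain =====

-- B builds a multiplicity table of the requested pairs once and then scans the matrix once,
-- instead of scanning a matrix row per requested pair (objective: alternative algorithm).

-- ===== PORT A =====
def sumarValoresMatriz (matriz : List (Int × List (Int × Int))) (par : List (Int × Int)) : Int :=
  par.foldl (fun sumaParejas ij =>
    match (PySem.Dict.mk matriz).get? ij.1 with
    | some fila => fila.foldl (fun s kl => if ij.2 = kl.1 then s + kl.2 else s) sumaParejas
    | none => sumaParejas) 0

-- ===== PORT B =====
def sumarValoresMatriz_alt (matriz : List (Int × List (Int × Int))) (par : List (Int × Int)) : Int :=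
  let cnt := par.foldl (fun d p => d.insert p (d.getD p 0 + 1)) (PySem.Dict.empty : PySem.Dict (Int × Int) Int)
  matriz.foldl (fun total fila =>
    fila.2.foldl (fun t kl => t + kl.2 * cnt.getD (fila.1, kl.1) 0) total) 0

-- ===== PRECONDITION & SPEC =====
-- Pre_ excludes association lists with duplicate keys, which do not represent any Python dict
-- (A's input 'matriz' is a dict, so its keys are necessarily distinct).
def Pre_sumarValoresMatriz (matriz : List (Int × List (Int × Int))) (par : List (Int × Int)) : Prop :=
  (matriz.map Prod.fst).Nodup
instance (matriz : List (Int × List (Int × Int))) (par : List (Int × Int)) : Decidable (Pre_sumarValoresMatriz matriz par) := by unfold Pre_sumarValoresMatriz; infer_instance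
def pvWitness_sumarValoresMatriz : (List (Int × List (Int × Int))) × (List (Int × Int)) :=
  ([(1, [(2, 3), (4, 5)]), (2, [(2, 7)])], [(1, 2), (2, 2), (1, 2)])
def Spec_sumarValoresMatriz (matriz : List (Int × List (Int × Int))) (par : List (Int × Int)) (out : Int) : Prop := out = sumarValoresMatriz_alt matriz par
instance (matriz : List (Int × List (Int × Int))) (par : List (Int × Int)) (out : Int) : Decidable (Spec_sumarValoresMatriz matriz par out) := by unfold Spec_sumarValoresMatriz; infer_instance

-- ===== CLAIM (what is proved, stated in full; the proofs are below) =====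
def Claim_equal_sumarValoresMatriz : Prop := ∀ (matriz : List (Int × List (Int × Int))) (par : List (Int × Int)), Dom_sumarValoresMatriz matriz par → Pre_sumarValoresMatriz matriz par → Spec_sumarValoresMatriz matriz par (sumarValoresMatriz matriz par)

-- ===== LEMMAS AND PROOFS =====

-- value contributed to A's sum by one pair p
def pvF (matriz : List (Int × List (Int × Int))) (p : Int × Int) : Int :=
  match (PySem.Dict.mk matriz).get? p.1 with
  | some fila => (fila.map (fun kl => if p.2 = kl.1 then kl.2 else 0)).sum
  | none => 0

theorem pv_innerA (fila : List (Int × Int)) (j s : Int) :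
    fila.foldl (fun s kl => if j = kl.1 then s + kl.2 else s) s
      = s + (fila.map (fun kl => if j = kl.1 then kl.2 else 0)).sum := by
  induction fila generalizing s with
  | nil => simp
  | cons a t ih =>
    simp only [List.foldl_cons, List.map_cons, List.sum_cons]
    split_ifs with h <;> rw [ih] <;> ring

theorem pv_A_foldl (matriz : List (Int × List (Int × Int))) (par : List (Int × Int)) (s : Int) :
    par.foldl (fun sumaParejas ij =>
      match (PySem.Dict.mk matriz).get? ij.1 with
      | some fila => fila.foldl (fun s kl => if ij.2 = kl.1 then s + kl.2 else s) sumaParejas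
      | none => sumaParejas) s
    = s + (par.map (pvF matriz)).sum := by
  induction par generalizing s with
  | nil => simp
  | cons p t ih =>
    simp only [List.foldl_cons, List.map_cons, List.sum_cons]
    cases h : (PySem.Dict.mk matriz).get? p.1 with
    | none => rw [ih]; simp [pvF, h]
    | some fila =>
      dsimp only
      rw [pv_innerA, ih]
      simp only [pvF, h]
      ring

theorem pv_A_eq (matriz : List (Int × List (Int × Int))) (par : List (Int × Int)) :
    sumarValoresMatriz matriz par = (par.map (pvF matriz)).sum := by
  unfold sumarValoresMatriz
  rw [pv_A_foldl]; ring

theorem pv_B_eq (matriz : List (Int × List (Int × Int))) (par : List (Int × Int)) :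
    sumarValoresMatriz_alt matriz par
      = (matriz.map (fun fila =>
          (fila.2.map (fun kl => kl.2 * (par.count (fila.1, kl.1) : Int))).sum)).sum := by
  unfold sumarValoresMatriz_alt
  simp only [PySem.List.foldl_add, PySem.Dict.getD_foldl_insert_add_one,
    PySem.Dict.getD_empty, zero_add]

-- rows whose key differs from p.1 contribute nothing to the per-pair matrix sum
theorem pv_zero_of_not_mem (rest : List (Int × List (Int × Int))) (p : Int × Int)
    (h : p.1 ∉ rest.map Prod.fst) :
    (rest.map (fun fila =>
      (fila.2.map (fun kl => if p = (fila.1, kl.1) then kl.2 else 0)).sum)).sum = 0 := by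
  induction rest with
  | nil => simp
  | cons fila t ih =>
    simp only [List.map_cons, List.mem_cons, not_or] at h
    simp only [List.map_cons, List.sum_cons, ih h.2, add_zero]
    apply List.sum_eq_zero
    intro x hx
    simp only [List.mem_map] at hx
    obtain ⟨kl, _, rfl⟩ := hx
    have : ¬ p = (fila.1, kl.1) := by
      intro he; exact h.1 (by rw [he])
    simp [this]

-- per-pair: A's contribution equals the pair's contribution summed over the whole matrix
theorem pv_F_eq (matriz : List (Int × List (Int × Int))) (p : Int × Int)
    (hnd : (matriz.map Prod.fst).Nodup) :
    pvF matriz p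
      = (matriz.map (fun fila =>
          (fila.2.map (fun kl => if p = (fila.1, kl.1) then kl.2 else 0)).sum)).sum := by
  induction matriz with
  | nil => simp [pvF, PySem.Dict.get?]
  | cons fila t ih =>
    simp only [List.map_cons, List.nodup_cons] at hnd
    simp only [List.map_cons, List.sum_cons]
    by_cases hk : fila.1 = p.1
    · have h2 : p.1 ∉ t.map Prod.fst := hk ▸ hnd.1
      rw [pv_zero_of_not_mem t p h2, add_zero]
      unfold pvF
      rw [PySem.Dict.get?_mk_cons]
      simp only [hk, beq_self_eq_true, if_true]
      apply congrArg
      apply List.map_congr_left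
      intro kl _
      have hiff : p = (p.1, kl.1) ↔ p.2 = kl.1 := by
        simp [Prod.ext_iff]
      exact if_congr hiff.symm rfl rfl
    · have : pvF (fila :: t) p = pvF t p := by
        unfold pvF
        rw [PySem.Dict.get?_mk_cons]
        simp [beq_iff_eq, hk]
      rw [this, ih hnd.2]
      have hz : (fila.2.map (fun kl => if p = (fila.1, kl.1) then kl.2 else 0)).sum = 0 := by
        apply List.sum_eq_zero
        intro x hx
        simp only [List.mem_map] at hx
        obtain ⟨kl, _, rfl⟩ := hx
        have : ¬ p = (fila.1, kl.1) := by
          intro he; exact hk (by rw [he])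
        simp [this]
      rw [hz, zero_add]

theorem pv_main (matriz : List (Int × List (Int × Int))) (par : List (Int × Int))
    (hnd : (matriz.map Prod.fst).Nodup) :
    (par.map (pvF matriz)).sum
      = (matriz.map (fun fila =>
          (fila.2.map (fun kl => kl.2 * (par.count (fila.1, kl.1) : Int))).sum)).sum := by
  induction par with
  | nil => simp
  | cons p t ih =>
    simp only [List.map_cons, List.sum_cons]
    have hc : ∀ q : Int × Int, ((p :: t).count q : Int) = (t.count q : Int) + (if p = q then 1 else 0) := by
      intro q
      rw [List.count_cons]
      by_cases h : p = q <;> simp [h]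
    simp only [hc, mul_add, List.sum_map_add, ih, mul_ite, mul_one, mul_zero]
    rw [pv_F_eq matriz p hnd]
    ring

-- ===== VERDICT (by name: the statement is the Claim_ definition above) =====
theorem sumarValoresMatriz_spec : Claim_equal_sumarValoresMatriz := by
  intro matriz par _ hpre
  unfold Spec_sumarValoresMatriz
  rw [pv_A_eq, pv_B_eq, pv_main matriz par hpre]
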